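-- pv_equiv track=rewrite | github.com/Pixelcubes/Pixelcubing | slot_machine_sort/slot_machine_sort.py | preserves_elements
-- ===== SOURCE A (Python) =====
-- def preserves_elements(slots, original):
--     if len(slots) != len(original):
--         return False
--
--     bag = list(original)
--
--     for x in slots:
--         if x in bag:
--             bag.remove(x)
--         else:
--             return False
--     return True
-- ===== SOURCE B (Python) =====
-- def preserves_elements(slots, original):
--     if len(slots) != len(original):
--         return False
--     return sorted(slots) == sorted(original)
-- ===== Notes on version B (the rewrite author's own statement) =====
-- stated objective: simpler
-- what changed: Replaces A's per-element linear search-and-remove over a shrinking bag with a single sort of both lists and one element-wise comparison.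
import Mathlib
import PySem

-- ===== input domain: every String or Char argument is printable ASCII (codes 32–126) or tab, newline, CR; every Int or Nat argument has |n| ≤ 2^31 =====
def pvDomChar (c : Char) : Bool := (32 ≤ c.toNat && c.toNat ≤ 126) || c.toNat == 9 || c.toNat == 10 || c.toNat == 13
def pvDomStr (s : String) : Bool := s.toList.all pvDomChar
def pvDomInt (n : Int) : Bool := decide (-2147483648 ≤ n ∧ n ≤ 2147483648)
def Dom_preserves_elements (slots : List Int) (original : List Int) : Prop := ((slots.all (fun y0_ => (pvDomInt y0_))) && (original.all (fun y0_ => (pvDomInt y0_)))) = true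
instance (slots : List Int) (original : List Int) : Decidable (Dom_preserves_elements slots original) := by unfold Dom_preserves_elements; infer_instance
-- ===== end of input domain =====

-- B replaces A's linear search-and-remove bag loop by sorting both lists once and comparing; objective: simpler.
-- ===== PORT A =====
def peLoop (xs : List Int) (bag : List Int) : Bool :=
  match xs with
  | [] => true
  | x :: rest =>
    if bag.contains x then
      match PySem.List.remove? bag x with
      | some bag' => peLoop rest bag'
      | none => false
    else false

def preserves_elements (slots : List Int) (original : List Int) : Bool :=
  if slots.length != original.length then false
  else peLoop slots original

-- ===== PORT B =====
def preserves_elements_alt (slots : List Int) (original : List Int) : Bool :=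
  if slots.length != original.length then false
  else decide (PySem.List.sorted slots (fun x => x) false = PySem.List.sorted original (fun x => x) false)

-- ===== PRECONDITION & SPEC =====
def Spec_preserves_elements (slots : List Int) (original : List Int) (out : Bool) : Prop := out = preserves_elements_alt slots original
instance (slots : List Int) (original : List Int) (out : Bool) : Decidable (Spec_preserves_elements slots original out) := by unfold Spec_preserves_elements; infer_instance

-- ===== CLAIM (what is proved, stated in full; the proofs are below) =====
def Claim_equal_preserves_elements : Prop := ∀ (slots : List Int) (original : List Int), Dom_preserves_elements slots original → Spec_preserves_elements slots original (preserves_elements slots original)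

-- ===== LEMMAS AND PROOFS =====

-- ===== VERDICT (by name: the statement is the Claim_ definition above) =====
lemma peLoop_iff (xs bag : List Int) : peLoop xs bag = true ↔ xs.Subperm bag := by
  induction xs generalizing bag with
  | nil => simp [peLoop, List.nil_subperm]
  | cons x rest ih =>
    by_cases hx : x ∈ bag
    · rw [peLoop]
      simp only [List.contains_eq_mem, hx, decide_true, if_true,
        PySem.List.remove?_eq_some_erase bag x hx]
      rw [ih]
      have hp : bag.Perm (x :: bag.erase x) := List.perm_cons_erase hx
      constructor
      · intro h
        exact ((List.subperm_cons x).2 h).trans hp.symm.subperm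
      · intro h
        exact (List.subperm_cons x).1 (h.trans hp.subperm)
    · rw [peLoop]
      simp only [List.contains_eq_mem, hx, decide_false, Bool.false_eq_true, if_false]
      simp only [false_iff]
      intro h
      exact absurd (h.subset List.mem_cons_self) hx

theorem preserves_elements_spec : Claim_equal_preserves_elements := by
  intro slots original _
  unfold Spec_preserves_elements preserves_elements preserves_elements_alt
  by_cases hlen : slots.length = original.length
  · simp only [hlen, bne_self_eq_false, Bool.false_eq_true, if_false]
    rcases h : peLoop slots original with _ | _
    · symm
      rw [decide_eq_false_iff_not]
      intro hperm
      have hp := (PySem.List.sorted_id_eq_sorted_id_iff_perm slots original).1 hperm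
      have : peLoop slots original = true :=
        (peLoop_iff slots original).2 hp.subperm
      simp [h] at this
    · symm
      rw [decide_eq_true_iff]
      have hsub := (peLoop_iff slots original).1 h
      exact (PySem.List.sorted_id_eq_sorted_id_iff_perm slots original).2
        (hsub.perm_of_length_le (le_of_eq hlen.symm))
  · simp [bne_iff_ne, hlen]
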